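-- pv_equiv track=rewrite | github.com/msjsc001/OmniClip-RAG | omniclip_rag/extensions/parsers/tika.py | build_tika_suffix_matcher
-- ===== SOURCE A (Python) =====
-- from typing import Iterable
--
-- _FORMAT_SUFFIX_ALIASES: dict[str, tuple[str, ...]] = {
--     # Curated aliases that collapse multiple common suffixes into one UI choice.
--     'html': ('.html', '.htm'),
--     'mhtml': ('.mhtml', '.mht'),
-- }
--
-- def suffix_patterns_for_format(format_id: str) -> tuple[str, ...]:
--     """Return the suffix patterns (lowercase, with leading dot) for one format id."""
--
--     normalized = str(format_id or '').strip().lower().lstrip('.')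
--     if not normalized:
--         return ()
--     aliases = _FORMAT_SUFFIX_ALIASES.get(normalized)
--     if aliases:
--         return tuple(dict.fromkeys([item.lower() for item in aliases if str(item).startswith('.')]))
--     return (f'.{normalized}',)
--
-- def build_tika_suffix_matcher(enabled_formats: Iterable[str]) -> dict[str, list[tuple[str, str]]]:
--     """Build a fast suffix matcher for enabled formats.
--
--     Returns a dict keyed by the last suffix segment (e.g. ".gz") that maps to a
--     list of (format_id, suffix_pattern) pairs. Each bucket is sorted by suffix
--     length descending so multi-part suffixes win (e.g. ".tar.gz" before ".gz").
--     """
--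
--     buckets: dict[str, list[tuple[str, str]]] = {}
--     for format_id_raw in enabled_formats:
--         format_id = str(format_id_raw or '').strip().lower()
--         if not format_id:
--             continue
--         for suffix in suffix_patterns_for_format(format_id):
--             suffix_lower = str(suffix).lower()
--             if not suffix_lower.startswith('.'):
--                 continue
--             last_segment = f".{suffix_lower.rsplit('.', 1)[-1]}" if '.' in suffix_lower[1:] else suffix_lower
--             buckets.setdefault(last_segment, []).append((format_id, suffix_lower))
--     for items in buckets.values():
--         items.sort(key=lambda pair: len(pair[1]), reverse=True)
--     return buckets
-- ===== SOURCE B (Python) =====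
-- from typing import Iterable
--
-- _FORMAT_SUFFIX_ALIASES: dict[str, tuple[str, ...]] = {
--     'html': ('.html', '.htm'),
--     'mhtml': ('.mhtml', '.mht'),
-- }
--
--
-- def suffix_patterns_for_format(format_id: str) -> tuple[str, ...]:
--     normalized = str(format_id or '').strip().lower().lstrip('.')
--     if not normalized:
--         return ()
--     aliases = _FORMAT_SUFFIX_ALIASES.get(normalized)
--     if aliases:
--         return tuple(dict.fromkeys([item.lower() for item in aliases if str(item).startswith('.')]))
--     return (f'.{normalized}',)
--
--
-- def build_tika_suffix_matcher(enabled_formats: Iterable[str]) -> dict[str, list[tuple[str, str]]]: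
--     """Collect flat (segment, format_id, suffix) records, sort them once globally
--     by suffix length descending (stable), then fill pre-seeded buckets in one pass."""
--     records: list[tuple[str, str, str]] = []
--     for format_id_raw in enabled_formats:
--         format_id = str(format_id_raw or '').strip().lower()
--         if not format_id:
--             continue
--         for suffix in suffix_patterns_for_format(format_id):
--             suffix_lower = str(suffix).lower()
--             if not suffix_lower.startswith('.'):
--                 continue
--             last_segment = f".{suffix_lower.rsplit('.', 1)[-1]}" if '.' in suffix_lower[1:] else suffix_lower
--             records.append((last_segment, format_id, suffix_lower))
--     buckets: dict[str, list[tuple[str, str]]] = {segment: [] for segment, _fid, _sfx in records}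
--     for segment, format_id, suffix_lower in sorted(records, key=lambda r: len(r[2]), reverse=True):
--         buckets[segment].append((format_id, suffix_lower))
--     return buckets
-- ===== Notes on version B (the rewrite author's own statement) =====
-- stated objective: alternative
-- what changed: A groups records into dict buckets during the scan and then sorts each bucket in place; B collects flat (segment, format_id, suffix) records, performs ONE stable global sort by suffix length descending, and fills pre-seeded buckets in a single grouping pass (stability makes every bucket come out in A's order).
import Mathlib
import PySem

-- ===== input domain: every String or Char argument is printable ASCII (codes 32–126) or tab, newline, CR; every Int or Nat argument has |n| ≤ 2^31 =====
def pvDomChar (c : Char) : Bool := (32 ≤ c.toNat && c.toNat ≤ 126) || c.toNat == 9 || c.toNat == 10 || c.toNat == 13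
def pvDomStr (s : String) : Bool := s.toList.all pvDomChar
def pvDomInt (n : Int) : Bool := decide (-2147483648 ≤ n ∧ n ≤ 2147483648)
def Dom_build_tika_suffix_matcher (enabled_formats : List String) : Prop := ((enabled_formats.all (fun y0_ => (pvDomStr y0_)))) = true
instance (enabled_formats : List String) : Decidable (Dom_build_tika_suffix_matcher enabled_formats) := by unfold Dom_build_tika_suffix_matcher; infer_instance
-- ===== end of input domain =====

def pvAliases : PySem.Dict String (List String) :=
  PySem.Dict.ofList [("html", [".html", ".htm"]), ("mhtml", [".mhtml", ".mht"])]

-- suffix_patterns_for_format (identical helper source in Source A and Source B).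
-- '.lstrip(".")' is ported by hand as dropWhile of '.' over the chars — exact: Python's
-- lstrip with a char set removes exactly the leading characters from that set.
def suffix_patterns_for_format (format_id : String) : List String :=
  let normalized :=
    String.ofList ((PySem.Str.lower (PySem.Str.strip format_id)).toList.dropWhile (fun c => c == '.'))
  if normalized = "" then []
  else
    let aliases := (pvAliases.get? normalized).getD []
    if aliases ≠ [] then
      PySem.List.dedup ((aliases.filter (fun item => PySem.Str.startswith item ".")).map PySem.Str.lower)
    else [String.ofList ('.' :: normalized.toList)]

-- last_segment line: "f'.{sl.rsplit(".", 1)[-1]}' if '.' in sl[1:] else sl".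
-- rsplit('.', 1)[-1] is ported by hand as the chars after the LAST '.' — exact whenever
-- '.' occurs in sl, which the guard '.' in sl[1:] (together with sl startswith '.') ensures here.
def pvLastSegment (sl : String) : String :=
  if PySem.Chars.isIn ['.'] (sl.toList.drop 1) then
    String.ofList ('.' :: (sl.toList.reverse.takeWhile (fun c => !(c == '.'))).reverse)
  else sl

def build_tika_suffix_matcher (enabled_formats : List String) : List (String × List (String × String)) :=
  let buckets : PySem.Dict String (List (String × String)) :=
    enabled_formats.foldl (fun d format_id_raw =>
      let format_id := PySem.Str.lower (PySem.Str.strip format_id_raw)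
      if format_id = "" then d
      else
        (suffix_patterns_for_format format_id).foldl (fun d suffix =>
          let suffix_lower := PySem.Str.lower suffix
          if PySem.Str.startswith suffix_lower "." = false then d
          else
            d.modify (pvLastSegment suffix_lower) [] (fun items => items ++ [(format_id, suffix_lower)])) d)
      PySem.Dict.empty
  -- 'for items in buckets.values(): items.sort(key=len(pair[1]), reverse=True)'
  buckets.items.map (fun p => (p.1, PySem.List.sorted p.2 (fun pair => PySem.Str.len pair.2) true))

-- ===== PORT B =====
def build_tika_suffix_matcher_alt (enabled_formats : List String) : List (String × List (String × String)) :=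
  let records : List (String × String × String) :=
    enabled_formats.foldl (fun acc format_id_raw =>
      let format_id := PySem.Str.lower (PySem.Str.strip format_id_raw)
      if format_id = "" then acc
      else
        (suffix_patterns_for_format format_id).foldl (fun acc suffix =>
          let suffix_lower := PySem.Str.lower suffix
          if PySem.Str.startswith suffix_lower "." = false then acc
          else acc ++ [(pvLastSegment suffix_lower, format_id, suffix_lower)]) acc) []
  -- '{segment: [] for segment, _, _ in records}'
  let buckets : PySem.Dict String (List (String × String)) :=
    records.foldl (fun d r => d.insert r.1 ([] : List (String × String))) PySem.Dict.empty
  -- 'for segment, fid, sl in sorted(records, key=len(r[2]), reverse=True): buckets[segment].append((fid, sl))'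
  let filled :=
    (PySem.List.sorted records (fun r => PySem.Str.len r.2.2) true).foldl
      (fun d r => d.modify r.1 [] (fun items => items ++ [r.2])) buckets
  filled.items

-- ===== PRECONDITION & SPEC =====

-- ===== LEMMAS AND PROOFS =====

-- ===== PRECONDITION & SPEC =====
def Spec_build_tika_suffix_matcher (enabled_formats : List String) (out : List (String × List (String × String))) : Prop := out = build_tika_suffix_matcher_alt enabled_formats
instance (enabled_formats : List String) (out : List (String × List (String × String))) : Decidable (Spec_build_tika_suffix_matcher enabled_formats out) := by unfold Spec_build_tika_suffix_matcher; infer_instance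

-- ===== CLAIM (what is proved, stated in full; the proofs are below) =====
def Claim_equal_build_tika_suffix_matcher : Prop := ∀ (enabled_formats : List String), Dom_build_tika_suffix_matcher enabled_formats → Spec_build_tika_suffix_matcher enabled_formats (build_tika_suffix_matcher enabled_formats)

-- ===== LEMMAS AND PROOFS =====

-- The records one raw format id contributes, as a flat list (segment, (format_id, suffix)).
def pvPer (raw : String) : List (String × String × String) :=
  let fid := PySem.Str.lower (PySem.Str.strip raw)
  if fid = "" then []
  else
    (((suffix_patterns_for_format fid).map PySem.Str.lower).filter
        (fun sl => PySem.Str.startswith sl ".")).map (fun sl => (pvLastSegment sl, fid, sl))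

def pvRecs (efs : List String) : List (String × String × String) := efs.flatMap pvPer

theorem pvA_buckets (efs : List String) :
    (efs.foldl (fun d format_id_raw =>
      let format_id := PySem.Str.lower (PySem.Str.strip format_id_raw)
      if format_id = "" then d
      else
        (suffix_patterns_for_format format_id).foldl (fun d suffix =>
          let suffix_lower := PySem.Str.lower suffix
          if PySem.Str.startswith suffix_lower "." = false then d
          else
            d.modify (pvLastSegment suffix_lower) [] (fun items => items ++ [(format_id, suffix_lower)])) d)
      (PySem.Dict.empty : PySem.Dict String (List (String × String)))) =
    (pvRecs efs).foldl (fun d r => d.modify r.1 [] (fun items => items ++ [r.2])) PySem.Dict.empty := by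
  rw [pvRecs, List.foldl_flatMap]
  have h : (fun (d : PySem.Dict String (List (String × String))) format_id_raw =>
      let format_id := PySem.Str.lower (PySem.Str.strip format_id_raw)
      if format_id = "" then d
      else
        (suffix_patterns_for_format format_id).foldl (fun d suffix =>
          let suffix_lower := PySem.Str.lower suffix
          if PySem.Str.startswith suffix_lower "." = false then d
          else
            d.modify (pvLastSegment suffix_lower) [] (fun items => items ++ [(format_id, suffix_lower)])) d)
      = (fun d raw => (pvPer raw).foldl (fun d r => d.modify r.1 [] (fun items => items ++ [r.2])) d) := by
    funext d raw
    by_cases hfid : PySem.Str.lower (PySem.Str.strip raw) = ""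
    · simp [pvPer, hfid]
    · simp only [pvPer, hfid, if_false]
      have h1 : (suffix_patterns_for_format (PySem.Str.lower (PySem.Str.strip raw))).foldl
          (fun d suffix =>
            let suffix_lower := PySem.Str.lower suffix
            if PySem.Str.startswith suffix_lower "." = false then d
            else PySem.Dict.modify d (pvLastSegment suffix_lower) []
              (fun items => items ++ [(PySem.Str.lower (PySem.Str.strip raw), suffix_lower)])) d
          = ((suffix_patterns_for_format (PySem.Str.lower (PySem.Str.strip raw))).map PySem.Str.lower).foldl
            (fun d sl =>
              if PySem.Str.startswith sl "." = false then d
              else PySem.Dict.modify d (pvLastSegment sl) []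
                (fun items => items ++ [(PySem.Str.lower (PySem.Str.strip raw), sl)])) d :=
        (List.foldl_map (f := PySem.Str.lower) (g := fun d sl =>
          if PySem.Str.startswith sl "." = false then d
          else PySem.Dict.modify d (pvLastSegment sl) []
            (fun items => items ++ [(PySem.Str.lower (PySem.Str.strip raw), sl)]))).symm
      rw [h1]
      have h2 : (((((suffix_patterns_for_format (PySem.Str.lower (PySem.Str.strip raw))).map PySem.Str.lower).filter
            (fun sl => PySem.Str.startswith sl ".")).map
              (fun sl => (pvLastSegment sl, PySem.Str.lower (PySem.Str.strip raw), sl))).foldl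
          (fun d r => PySem.Dict.modify d r.1 [] (fun items => items ++ [r.2])) d)
          = ((((suffix_patterns_for_format (PySem.Str.lower (PySem.Str.strip raw))).map PySem.Str.lower).filter
            (fun sl => PySem.Str.startswith sl ".")).foldl
            (fun d sl => PySem.Dict.modify d (pvLastSegment sl) []
              (fun items => items ++ [(PySem.Str.lower (PySem.Str.strip raw), sl)])) d) :=
        List.foldl_map (f := fun sl => ((pvLastSegment sl, PySem.Str.lower (PySem.Str.strip raw), sl) : String × String × String))
          (g := fun d r => PySem.Dict.modify d r.1 [] (fun items => items ++ [r.2]))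
      rw [h2, ← PySem.List.foldl_if_eq_foldl_filter]
      have hstep : (fun (d : PySem.Dict String (List (String × String))) sl =>
          if PySem.Str.startswith sl "." = false then d
          else d.modify (pvLastSegment sl) []
            (fun items => items ++ [(PySem.Str.lower (PySem.Str.strip raw), sl)]))
          = (fun d sl => if PySem.Str.startswith sl "." = true then
              (PySem.Dict.modify d (pvLastSegment sl) []
                (fun items => items ++ [(PySem.Str.lower (PySem.Str.strip raw), sl)])) else d) := by
        funext d sl
        cases PySem.Str.startswith sl "." <;> simp
      rw [hstep]
  rw [h]

theorem pvB_records (efs : List String) :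
    (efs.foldl (fun acc format_id_raw =>
      let format_id := PySem.Str.lower (PySem.Str.strip format_id_raw)
      if format_id = "" then acc
      else
        (suffix_patterns_for_format format_id).foldl (fun acc suffix =>
          let suffix_lower := PySem.Str.lower suffix
          if PySem.Str.startswith suffix_lower "." = false then acc
          else acc ++ [(pvLastSegment suffix_lower, format_id, suffix_lower)]) acc) []) = pvRecs efs := by
  have h : (fun (acc : List (String × String × String)) format_id_raw =>
      let format_id := PySem.Str.lower (PySem.Str.strip format_id_raw)
      if format_id = "" then acc
      else
        (suffix_patterns_for_format format_id).foldl (fun acc suffix =>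
          let suffix_lower := PySem.Str.lower suffix
          if PySem.Str.startswith suffix_lower "." = false then acc
          else acc ++ [(pvLastSegment suffix_lower, format_id, suffix_lower)]) acc)
      = (fun acc raw => acc ++ pvPer raw) := by
    funext acc raw
    by_cases hfid : PySem.Str.lower (PySem.Str.strip raw) = ""
    · simp [pvPer, hfid]
    · simp only [pvPer, hfid, if_false]
      have h1 : (suffix_patterns_for_format (PySem.Str.lower (PySem.Str.strip raw))).foldl
          (fun acc suffix =>
            let suffix_lower := PySem.Str.lower suffix
            if PySem.Str.startswith suffix_lower "." = false then acc
            else acc ++ [(pvLastSegment suffix_lower, PySem.Str.lower (PySem.Str.strip raw), suffix_lower)]) acc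
          = ((suffix_patterns_for_format (PySem.Str.lower (PySem.Str.strip raw))).map PySem.Str.lower).foldl
            (fun acc sl =>
              if PySem.Str.startswith sl "." = false then acc
              else acc ++ [(pvLastSegment sl, PySem.Str.lower (PySem.Str.strip raw), sl)]) acc :=
        (List.foldl_map (f := PySem.Str.lower) (g := fun acc sl =>
          if PySem.Str.startswith sl "." = false then acc
          else acc ++ [(pvLastSegment sl, PySem.Str.lower (PySem.Str.strip raw), sl)])).symm
      rw [h1]
      have hstep : (fun (acc : List (String × String × String)) sl =>
          if PySem.Str.startswith sl "." = false then acc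
          else acc ++ [(pvLastSegment sl, PySem.Str.lower (PySem.Str.strip raw), sl)])
          = (fun acc sl => if PySem.Str.startswith sl "." = true then
              acc ++ [(pvLastSegment sl, PySem.Str.lower (PySem.Str.strip raw), sl)] else acc) := by
        funext acc sl
        cases PySem.Str.startswith sl "." <;> simp
      rw [hstep, PySem.List.foldl_append_if]
  rw [h, pvRecs]
  exact (List.flatMap_eq_foldl).symm


-- defining equation of PySem.List.insertBy on cons (holds by rfl)
theorem pv_insertBy_cons {α : Type} (b : α → α → Bool) (x y : α) (ys : List α) :
    PySem.List.insertBy b x (y :: ys) = if b x y then x :: y :: ys else y :: PySem.List.insertBy b x ys := rfl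

theorem pv_map_insertBy {α β : Type} (g : α → β) (bA : α → α → Bool) (bB : β → β → Bool)
    (hb : ∀ a a', bA a a' = bB (g a) (g a')) (x : α) (l : List α) :
    (PySem.List.insertBy bA x l).map g = PySem.List.insertBy bB (g x) (l.map g) := by
  induction l with
  | nil => rfl
  | cons y ys ih =>
    rw [pv_insertBy_cons, List.map_cons, pv_insertBy_cons, ← hb]
    cases h : bA x y
    · simp [ih]
    · simp

theorem pv_sorted_map {α β : Type} (g : α → β) (key : β → Int) (l : List α) :
    (PySem.List.sorted l (fun a => key (g a)) true).map g = PySem.List.sorted (l.map g) key true := by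
  rw [PySem.List.sorted_rev_eq_foldl_insertBy, PySem.List.sorted_rev_eq_foldl_insertBy]
  suffices h : ∀ acc : List α, (List.foldl (fun acc x =>
      PySem.List.insertBy (fun a b => decide (key (g b) < key (g a))) x acc) acc l).map g =
      List.foldl (fun acc y => PySem.List.insertBy (fun a b => decide (key b < key a)) y acc) (acc.map g) (l.map g) by
    simpa using h []
  induction l with
  | nil => intro acc; rfl
  | cons x xs ih =>
    intro acc
    rw [List.foldl_cons, List.map_cons, List.foldl_cons, ih,
      pv_map_insertBy g _ (fun a b => decide (key b < key a)) (fun a a' => rfl)]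

theorem pv_insertBy_front {α : Type} (key : α → Int) (x : α) (zs : List α)
    (h : ∀ z ∈ zs, key z < key x) :
    PySem.List.insertBy (fun a b => decide (key b < key a)) x zs = x :: zs := by
  cases zs with
  | nil => rfl
  | cons z zs' =>
    rw [pv_insertBy_cons]
    simp [h z (List.mem_cons_self)]

theorem pv_filter_insertBy {α : Type} (p : α → Bool) (key : α → Int) (x : α) (L : List α)
    (hL : L.Pairwise (fun a b => key b ≤ key a)) :
    (PySem.List.insertBy (fun a b => decide (key b < key a)) x L).filter p =
      if p x then PySem.List.insertBy (fun a b => decide (key b < key a)) x (L.filter p)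
      else L.filter p := by
  induction L with
  | nil =>
    cases h : p x <;> simp [PySem.List.insertBy, h]
  | cons y ys ih =>
    rcases List.pairwise_cons.mp hL with ⟨hy, hys⟩
    rw [pv_insertBy_cons]
    by_cases hxy : key y < key x
    · have hfront : PySem.List.insertBy (fun a b => decide (key b < key a)) x ((y :: ys).filter p)
          = x :: (y :: ys).filter p := by
        apply pv_insertBy_front
        intro z hz
        rcases List.mem_cons.mp (List.mem_of_mem_filter hz) with h1 | h2
        · exact h1 ▸ hxy
        · exact lt_of_le_of_lt (hy z h2) hxy
      simp only [hxy, decide_true, if_true]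
      cases h : p x
      · simp [List.filter_cons, h]
      · simp only [if_true]
        rw [hfront]
        simp [List.filter_cons, h]
    · simp only [hxy, decide_false, Bool.false_eq_true, if_false]
      rw [List.filter_cons]
      cases hpy : p y
      · simp only [Bool.false_eq_true, if_false]
        rw [ih hys]
        simp [hpy]
      · simp only [if_true]
        rw [ih hys]
        cases hpx : p x
        · simp [hpy]
        · simp only [List.filter_cons, hpy, if_true]
          rw [pv_insertBy_cons]
          simp [hxy]

theorem pv_sorted_filter {α : Type} (p : α → Bool) (key : α → Int) (l : List α) :
    (PySem.List.sorted l key true).filter p = PySem.List.sorted (l.filter p) key true := by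
  induction l using List.reverseRecOn with
  | nil => rfl
  | append_singleton xs x ih =>
    have hsnoc : ∀ (m : List α), PySem.List.sorted (m ++ [x]) key true
        = PySem.List.insertBy (fun a b => decide (key b < key a)) x (PySem.List.sorted m key true) := by
      intro m
      rw [PySem.List.sorted_rev_eq_foldl_insertBy, PySem.List.sorted_rev_eq_foldl_insertBy,
        List.foldl_append, List.foldl_cons, List.foldl_nil]
    rw [hsnoc, pv_filter_insertBy p key x _ (PySem.List.sorted_pairwise_rev _ _), ih, List.filter_append]
    cases h : p x
    · simp [h]
    · simp only [h, if_true, List.filter_cons, List.filter_nil]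
      rw [hsnoc]

-- items of a dict with Nodup keys, as a map over its keys
theorem pv_items_eq {κ ν : Type} [BEq κ] [LawfulBEq κ] (d : PySem.Dict κ ν) (v0 : ν)
    (h : d.keys.Nodup) : d.items = d.keys.map (fun k => (k, d.getD k v0)) := by
  obtain ⟨l⟩ := d
  induction l with
  | nil => rfl
  | cons p rest ih =>
    obtain ⟨k1, v1⟩ := p
    have hkeys : (PySem.Dict.mk ((k1, v1) :: rest)).keys = k1 :: (PySem.Dict.mk rest).keys := rfl
    rw [hkeys] at h ⊢
    rcases List.nodup_cons.mp h with ⟨hk1, hrest⟩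
    rw [List.map_cons]
    have hself : (PySem.Dict.mk ((k1, v1) :: rest)).getD k1 v0 = v1 := by
      simp [PySem.Dict.getD, PySem.Dict.get?_mk_cons]
    rw [hself]
    have htail : ∀ k ∈ (PySem.Dict.mk rest : PySem.Dict κ ν).keys,
        (PySem.Dict.mk ((k1, v1) :: rest)).getD k v0 = (PySem.Dict.mk rest).getD k v0 := by
      intro k hk
      have hne : ¬ (k1 == k) = true := by
        intro hbeq
        exact hk1 (by rw [eq_of_beq hbeq]; exact hk)
      simp [PySem.Dict.getD, PySem.Dict.get?_mk_cons, hne]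
    calc ((k1, v1) :: rest : List (κ × ν))
        = (k1, v1) :: (PySem.Dict.mk rest : PySem.Dict κ ν).items := rfl
      _ = (k1, v1) :: (PySem.Dict.mk rest : PySem.Dict κ ν).keys.map
            (fun k => (k, (PySem.Dict.mk rest).getD k v0)) := by rw [ih hrest]
      _ = (k1, v1) :: (PySem.Dict.mk rest : PySem.Dict κ ν).keys.map
            (fun k => (k, (PySem.Dict.mk ((k1, v1) :: rest)).getD k v0)) := by
          congr 1
          exact (List.map_congr_left (fun k hk => by rw [htail k hk])).symm

theorem pv_update_nil (xs : List String) : PySem.Set.update [] xs = PySem.Set.ofList xs := by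
  simp [PySem.Set.update_eq_append_filter, PySem.Set.contains]

theorem pv_update_self (xs : List String) (s : PySem.Set String)
    (h : ∀ y ∈ xs, s.contains y = true) : PySem.Set.update s xs = s := by
  rw [PySem.Set.update_eq_append_filter]
  have hnil : (PySem.Set.ofList xs).filter (fun y => !s.contains y) = [] := by
    apply List.filter_eq_nil_iff.mpr
    intro y hy
    rw [h y ((PySem.Set.mem_ofList xs y).mp hy)]
    simp
  rw [hnil, List.append_nil]

theorem pv_seed_getD (rs : List (String × String × String)) :
    ∀ (d : PySem.Dict String (List (String × String))), (∀ k', d.getD k' [] = []) →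
    ∀ k, (rs.foldl (fun d r => d.insert r.1 ([] : List (String × String))) d).getD k [] = [] := by
  induction rs with
  | nil => intro d hd k; exact hd k
  | cons r rest ih =>
    intro d hd k
    rw [List.foldl_cons]
    refine ih _ (fun k' => ?_) k
    by_cases hk : k' = r.1
    · rw [hk, PySem.Dict.getD_insert_self]
    · rw [PySem.Dict.getD_insert_of_ne _ _ _ hk]
      exact hd k'

-- the key list both dicts carry: first occurrence order of the record segments
def pvKeys (rs : List (String × String × String)) : List String :=
  PySem.Set.ofList (rs.map (fun r => r.1))

theorem pvA_items (rs : List (String × String × String)) :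
    (rs.foldl (fun d r => d.modify r.1 [] (fun items => items ++ [r.2]))
        (PySem.Dict.empty : PySem.Dict String (List (String × String)))).items =
      (pvKeys rs).map (fun k => (k, (rs.filter (fun r => r.1 == k)).map (fun r => r.2))) := by
  have hkeys : (rs.foldl (fun d r => d.modify r.1 [] (fun items => items ++ [r.2]))
      (PySem.Dict.empty : PySem.Dict String (List (String × String)))).keys = pvKeys rs := by
    rw [PySem.Dict.keys_foldl_modify_key rs (fun r => r.1) [] (fun _ r items => items ++ [r.2])]
    exact pv_update_nil _
  have hnodup : (rs.foldl (fun d r => d.modify r.1 [] (fun items => items ++ [r.2]))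
      (PySem.Dict.empty : PySem.Dict String (List (String × String)))).keys.Nodup := by
    rw [hkeys]
    exact PySem.Set.nodup_ofList _
  rw [pv_items_eq _ [] hnodup, hkeys]
  apply List.map_congr_left
  intro k _
  rw [PySem.Dict.getD_foldl_modify_append]
  rfl

theorem pvB_items (rs : List (String × String × String)) :
    ((PySem.List.sorted rs (fun r => PySem.Str.len r.2.2) true).foldl
        (fun d r => d.modify r.1 [] (fun items => items ++ [r.2]))
        (rs.foldl (fun d r => d.insert r.1 ([] : List (String × String))) PySem.Dict.empty)).items =
      (pvKeys rs).map (fun k => (k,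
        ((PySem.List.sorted rs (fun r => PySem.Str.len r.2.2) true).filter
          (fun r => r.1 == k)).map (fun r => r.2))) := by
  have hseedkeys : (rs.foldl (fun d r => d.insert r.1 ([] : List (String × String)))
      (PySem.Dict.empty : PySem.Dict String (List (String × String)))).keys = pvKeys rs := by
    rw [PySem.Dict.keys_foldl_insert_key rs (fun r => r.1) (fun _ _ => [])]
    exact pv_update_nil _
  have hkeys : ((PySem.List.sorted rs (fun r => PySem.Str.len r.2.2) true).foldl
      (fun d r => d.modify r.1 [] (fun items => items ++ [r.2]))
      (rs.foldl (fun d r => d.insert r.1 ([] : List (String × String))) PySem.Dict.empty)).keys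
      = pvKeys rs := by
    rw [PySem.Dict.keys_foldl_modify_key (PySem.List.sorted rs (fun r => PySem.Str.len r.2.2) true)
      (fun (r : String × String × String) => r.1) []
      (fun _ (r : String × String × String) items => items ++ [r.2]), hseedkeys]
    apply pv_update_self
    intro y hy
    rcases List.mem_map.mp hy with ⟨r, hr, hry⟩
    apply (PySem.Set.contains_iff _ _).mpr
    apply (PySem.Set.mem_ofList _ _).mpr
    exact List.mem_map.mpr ⟨r, (PySem.List.sorted_perm rs _ true).mem_iff.mp hr, hry⟩
  have hnodup : ((PySem.List.sorted rs (fun r => PySem.Str.len r.2.2) true).foldl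
      (fun d r => d.modify r.1 [] (fun items => items ++ [r.2]))
      (rs.foldl (fun d r => d.insert r.1 ([] : List (String × String))) PySem.Dict.empty)).keys.Nodup := by
    rw [hkeys]; exact PySem.Set.nodup_ofList _
  rw [pv_items_eq _ [] hnodup, hkeys]
  apply List.map_congr_left
  intro k _
  rw [PySem.Dict.getD_foldl_modify_append]
  rw [pv_seed_getD rs _ (fun k' => rfl) k]
  rfl

theorem pv_bucket (rs : List (String × String × String)) (k : String) :
    PySem.List.sorted ((rs.filter (fun r => r.1 == k)).map (fun r => r.2))
        (fun pair => PySem.Str.len pair.2) true =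
      ((PySem.List.sorted rs (fun r => PySem.Str.len r.2.2) true).filter
        (fun r => r.1 == k)).map (fun r => r.2) := by
  rw [pv_sorted_filter, pv_sorted_map (fun r : String × String × String => r.2)
    (fun pair => PySem.Str.len pair.2)]

theorem build_tika_suffix_matcher_spec' (efs : List String) :
    build_tika_suffix_matcher efs = build_tika_suffix_matcher_alt efs := by
  rw [build_tika_suffix_matcher, build_tika_suffix_matcher_alt]
  simp only []
  rw [pvA_buckets, pvB_records, pvA_items, pvB_items, List.map_map]
  apply List.map_congr_left
  intro k _
  simp only [Function.comp]
  rw [pv_bucket]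

-- ===== VERDICT (by name: the statement is the Claim_ definition above) =====
theorem build_tika_suffix_matcher_spec : Claim_equal_build_tika_suffix_matcher := by
  intro efs _
  exact build_tika_suffix_matcher_spec' efs
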